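-- pv_equiv track=rewrite | github.com/10S1/definitionexpansion | sTeX/preprocessingInterface.py | adjust_dollar_sign_spacing
-- ===== SOURCE A (Python) =====
-- def adjust_dollar_sign_spacing(sentence: str) -> str:
--     """Adds spaces around dollar signs for postprocessing the result sentence."""
--     parts = sentence.split('$')
--     new_sentence = ''
--
--     for i in range(len(parts)):
--         if i % 2 == 0:
--             # Part before the dollar sign
--             if parts[i].endswith(' '):
--                 part = parts[i][:-1]  # Remove only the last space if it's before a closing dollar sign
--             else:
--                 part = parts[i]
--         else:
--             # Part after the dollar sign
--             if parts[i].startswith(' '):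
--                 part = parts[i][1:]  # Remove only the first space if it's after an opening dollar sign
--             else:
--                 part = parts[i]
--
--         # Reattach the dollar sign except for the last part
--         if i < len(parts) - 1:
--             new_sentence += part + '$'
--         else:
--             new_sentence += part
--
--     return new_sentence
-- ===== SOURCE B (Python) =====
-- def adjust_dollar_sign_spacing(sentence: str) -> str:
--     """Single left-to-right scan: at each odd-numbered dollar sign drop one space
--     immediately before it (from the buffer) and skip one space immediately
--     after it; even-numbered dollars and all other characters pass through."""
--     out = []
--     odd = False  # parity of dollar signs seen so far
--     i = 0
--     n = len(sentence)
--     while i < n: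
--         c = sentence[i]
--         if c == '$':
--             odd = not odd
--             if odd:
--                 if out and out[-1] == ' ':
--                     out.pop()
--                 out.append('$')
--                 if i + 1 < n and sentence[i + 1] == ' ':
--                     i += 1
--             else:
--                 out.append('$')
--         else:
--             out.append(c)
--         i += 1
--     return ''.join(out)
-- ===== Notes on version B (the rewrite author's own statement) =====
-- stated objective: alternative
-- what changed: Replaced split-on-dollar plus indexed reassembly with a single left-to-right character scan that keeps a running dollar-parity flag and edits at most one space on each side of every odd-numbered dollar sign in place.
-- intended difference: On sentences that end with a space and contain an even number of dollar signs (including none), A silently drops the sentence's final space even though no dollar sign is adjacent to it (an artefact of applying the even-part trailing strip to the last split part), while B keeps that space, which is the intended behaviour since the strip is meant for spaces before an opening dollar sign. — e.g. on adjust_dollar_sign_spacing("a "): A returns "a", B returns "a "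
import Mathlib
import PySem

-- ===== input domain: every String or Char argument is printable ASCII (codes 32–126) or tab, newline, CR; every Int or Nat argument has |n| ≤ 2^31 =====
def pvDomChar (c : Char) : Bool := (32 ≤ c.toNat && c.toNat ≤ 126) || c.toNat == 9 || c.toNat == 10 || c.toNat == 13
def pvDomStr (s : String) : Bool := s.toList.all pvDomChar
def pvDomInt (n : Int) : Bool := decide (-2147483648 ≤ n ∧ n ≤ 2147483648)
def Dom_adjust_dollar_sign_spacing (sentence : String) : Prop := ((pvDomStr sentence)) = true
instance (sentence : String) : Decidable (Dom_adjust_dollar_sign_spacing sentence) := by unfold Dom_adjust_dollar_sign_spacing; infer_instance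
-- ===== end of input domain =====

-- B replaces A's split-on-dollar-and-reassemble with a single character scan keeping a
-- dollar-parity flag (objective: alternative, not claimed faster); B intentionally keeps
-- a sentence-final space that A drops when the number of dollar signs is even (see D_ below).

-- ===== PORT A =====
-- the loop body of A (named so the fold lemma can refer to it verbatim)
def pvABody (parts : List (List Char)) (new_sentence : List Char) (i : Int) : List Char :=
  let pi := PySem.List.pyGetD parts i []
  let part :=
    if PySem.Int.mod i 2 = 0 then
      if PySem.Chars.endswith pi [' '] then PySem.Chars.slice pi none (some (-1)) else pi
    else
      if PySem.Chars.startswith pi [' '] then PySem.Chars.slice pi (some 1) none else pi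
  if i < PySem.List.len parts - 1 then new_sentence ++ part ++ ['$']
  else new_sentence ++ part


def adjust_dollar_sign_spacing (sentence : String) : String :=
  let parts := PySem.Chars.splitOn sentence.toList ['$']
  let new_sentence : List Char :=
    (PySem.List.pyRange 0 (PySem.List.len parts) 1).foldl (pvABody parts) []
  String.ofList new_sentence


-- ===== PORT B =====
def pvBLoop : List Char → Bool → List Char → List Char
  | [], _, acc => acc.reverse
  | c :: rest, odd, acc =>
    if c = '$' then
      if odd then
        pvBLoop rest false ('$' :: acc)
      else
        let acc' := if acc.head? = some ' ' then acc.tail else acc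
        match rest with
        | [] => pvBLoop [] true ('$' :: acc')
        | d :: rest2 =>
          if d = ' ' then pvBLoop rest2 true ('$' :: acc')
          else pvBLoop (d :: rest2) true ('$' :: acc')
    else pvBLoop rest odd (c :: acc)


def adjust_dollar_sign_spacing_alt (sentence : String) : String :=
  String.ofList (pvBLoop sentence.toList false [])


-- ===== PRECONDITION & SPEC =====
-- On sentences that end with a space and contain an even number of dollar signs (including none),
-- A silently drops the sentence's final space even though no dollar sign is adjacent to
-- it (an artefact of applying the even-part trailing strip to the last split part),
-- while B keeps that space, which is the intended behaviour since the strip is meant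
-- for spaces before an opening dollar sign.
def D_adjust_dollar_sign_spacing (sentence : String) : Prop :=
  sentence.toList.getLast? = some ' ' ∧ sentence.toList.count '$' % 2 = 0
instance (sentence : String) : Decidable (D_adjust_dollar_sign_spacing sentence) := by
  unfold D_adjust_dollar_sign_spacing; infer_instance

def Spec_adjust_dollar_sign_spacing (sentence : String) (out : String) : Prop :=
  ¬ D_adjust_dollar_sign_spacing sentence → out = adjust_dollar_sign_spacing_alt sentence
instance (sentence : String) (out : String) : Decidable (Spec_adjust_dollar_sign_spacing sentence out) := by
  unfold Spec_adjust_dollar_sign_spacing; infer_instance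

def pvDiffWitness_adjust_dollar_sign_spacing : String := "a "
def pvDiffWitnessOut_adjust_dollar_sign_spacing : String × String := ("a", "a ")

-- ===== CLAIM (what is proved, stated in full; the proofs are below) =====
def Claim_unchanged_adjust_dollar_sign_spacing : Prop := ∀ (sentence : String), Dom_adjust_dollar_sign_spacing sentence → Spec_adjust_dollar_sign_spacing sentence (adjust_dollar_sign_spacing sentence)
def Claim_changed_adjust_dollar_sign_spacing : Prop := Dom_adjust_dollar_sign_spacing (pvDiffWitness_adjust_dollar_sign_spacing) ∧ D_adjust_dollar_sign_spacing (pvDiffWitness_adjust_dollar_sign_spacing) ∧ adjust_dollar_sign_spacing (pvDiffWitness_adjust_dollar_sign_spacing) = pvDiffWitnessOut_adjust_dollar_sign_spacing.1 ∧ adjust_dollar_sign_spacing_alt (pvDiffWitness_adjust_dollar_sign_spacing) = pvDiffWitnessOut_adjust_dollar_sign_spacing.2 ∧ pvDiffWitnessOut_adjust_dollar_sign_spacing.1 ≠ pvDiffWitnessOut_adjust_dollar_sign_spacing.2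
def Claim_exact_adjust_dollar_sign_spacing : Prop := ∀ (sentence : String), Dom_adjust_dollar_sign_spacing sentence → D_adjust_dollar_sign_spacing sentence → adjust_dollar_sign_spacing sentence ≠ adjust_dollar_sign_spacing_alt sentence

-- ===== LEMMAS AND PROOFS =====

theorem pfx_one (l : List Char) (x : Char) : [x] <+: l ↔ l.head? = some x := by
  cases l with
  | nil => simp
  | cons a t => simp [List.cons_prefix_cons, eq_comm]

theorem sfx_one (l : List Char) (x : Char) : [x] <:+ l ↔ l.getLast? = some x := by
  constructor
  · rintro ⟨pre, rfl⟩; simp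
  · intro h
    rcases List.eq_nil_or_concat l with rfl | ⟨ys, y, hy⟩
    · simp at h
    · subst hy; simp at h; subst h; exact ⟨ys, by simp⟩

def pvSplit : List Char → List (List Char)
  | [] => [[]]
  | c :: rest => if c = '$' then [] :: pvSplit rest else (pvSplit rest).modifyHead (c :: ·)

theorem go_step (n : Nat) (c : Char) (rest cur : List Char) (acc : List (List Char)) :
    PySem.Chars.splitOn.go ['$'] (n + 1) (c :: rest) cur acc
      = if ['$'].isPrefixOf (c :: rest) = true then
          PySem.Chars.splitOn.go ['$'] n (List.drop 1 (c :: rest)) [] (cur.reverse :: acc)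
        else PySem.Chars.splitOn.go ['$'] n rest (c :: cur) acc := rfl

theorem go_eq : ∀ (fuel : Nat) (l cur : List Char) (acc : List (List Char)), l.length < fuel →
    PySem.Chars.splitOn.go ['$'] fuel l cur acc
      = acc.reverse ++ (pvSplit l).modifyHead (cur.reverse ++ ·) := by
  intro fuel
  induction fuel with
  | zero => intro l cur acc h; omega
  | succ n ih =>
    intro l cur acc h
    cases l with
    | nil => rw [PySem.Chars.splitOn.go.eq_def]; simp [pvSplit]
    | cons c rest =>
      simp only [List.length_cons] at h
      by_cases hc : c = '$'
      · subst hc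
        rw [go_step, if_pos (by simp [List.isPrefixOf]), List.drop_one, List.tail_cons,
          ih rest [] (List.reverse cur :: acc) (by omega)]
        simp only [pvSplit, if_pos rfl]
        cases pvSplit rest <;> simp
      · rw [go_step, if_neg (by simp [List.isPrefixOf]; exact fun h' => hc h'.symm),
          ih rest (c :: cur) acc (by omega)]
        simp only [pvSplit, if_neg hc, List.modifyHead_modifyHead]
        congr 1
        cases pvSplit rest <;> simp

theorem pvSplitOn_eq (cs : List Char) : PySem.Chars.splitOn cs ['$'] = pvSplit cs := by
  rw [PySem.Chars.splitOn, go_eq (cs.length + 1) cs [] [] (by omega)]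
  cases h : pvSplit cs <;> simp

def pvJoinD : List (List Char) → List Char
  | [] => []
  | [p] => p
  | p :: q :: ps => p ++ '$' :: pvJoinD (q :: ps)

theorem pvSplit_ne_nil : ∀ cs : List Char, pvSplit cs ≠ []
  | [] => by simp [pvSplit]
  | c :: rest => by
    simp only [pvSplit]
    split
    · simp
    · cases h : pvSplit rest with
      | nil => exact absurd h (pvSplit_ne_nil rest)
      | cons p ps => simp

theorem pvSplit_length (cs : List Char) : (pvSplit cs).length = cs.count '$' + 1 := by
  induction cs with
  | nil => simp [pvSplit]
  | cons c rest ih =>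
    by_cases hc : c = '$'
    · subst hc; simp [pvSplit, ih, List.count_cons]
    · simp [pvSplit, hc, ih, List.count_cons, Ne.symm hc]

theorem pvSplit_no_dollar (cs : List Char) : ∀ p ∈ pvSplit cs, '$' ∉ p := by
  induction cs with
  | nil => simp [pvSplit]
  | cons c rest ih =>
    by_cases hc : c = '$'
    · subst hc; simp only [pvSplit, if_pos rfl]
      intro p hp
      rcases List.mem_cons.mp hp with rfl | hp
      · simp
      · exact ih p hp
    · simp only [pvSplit, if_neg hc]
      cases h : pvSplit rest with
      | nil => exact absurd h (pvSplit_ne_nil rest)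
      | cons q qs =>
        intro p hp
        rcases List.mem_cons.mp hp with rfl | hp
        · intro hmem
          rcases List.mem_cons.mp hmem with h' | h'
          · exact hc h'.symm
          · exact ih q (h ▸ List.mem_cons_self) h'
        · exact ih p (h ▸ List.mem_cons_of_mem q hp)

theorem pvJoinD_pvSplit (cs : List Char) : pvJoinD (pvSplit cs) = cs := by
  induction cs with
  | nil => simp [pvSplit, pvJoinD]
  | cons c rest ih =>
    by_cases hc : c = '$'
    · subst hc
      rw [show pvSplit ('$' :: rest) = [] :: pvSplit rest from by simp [pvSplit]]
      cases h : pvSplit rest with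
      | nil => exact absurd h (pvSplit_ne_nil rest)
      | cons q qs =>
        show pvJoinD ([] :: q :: qs) = '$' :: rest
        simp only [pvJoinD, List.nil_append]
        rw [← h, ih]
    · simp only [pvSplit, if_neg hc]
      cases h : pvSplit rest with
      | nil => exact absurd h (pvSplit_ne_nil rest)
      | cons q qs =>
        cases qs with
        | nil => simp only [List.modifyHead, pvJoinD]; rw [h] at ih; simpa [pvJoinD] using congrArg (c :: ·) ih
        | cons q2 qs2 => simp only [List.modifyHead, pvJoinD]; rw [h] at ih; simpa [pvJoinD] using congrArg (c :: ·) ih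

theorem pvSplit_getLast_sp (cs : List Char) :
    (((pvSplit cs).getLastD []).getLast? = some ' ') ↔ (cs.getLast? = some ' ') := by
  induction cs with
  | nil => simp [pvSplit]
  | cons c rest ih =>
    by_cases hc : c = '$'
    · subst hc
      cases hr : rest with
      | nil => decide
      | cons r rs =>
        rw [show pvSplit ('$' :: r :: rs) = [] :: pvSplit (r :: rs) from by simp [pvSplit]]
        cases h : pvSplit (r :: rs) with
        | nil => exact absurd h (pvSplit_ne_nil _)
        | cons q qs =>
          rw [hr, h] at ih
          rw [List.getLastD_cons, ih, List.getLast?_cons_cons]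
    · rw [show pvSplit (c :: rest) = (pvSplit rest).modifyHead (c :: ·) from by simp [pvSplit, hc]]
      cases h : pvSplit rest with
      | nil => exact absurd h (pvSplit_ne_nil _)
      | cons q qs =>
        cases qs with
        | nil =>
          have hq : q = rest := by
            have := pvJoinD_pvSplit rest; rw [h] at this; simpa [pvJoinD] using this
          subst hq
          simp [List.modifyHead]
        | cons q2 qs2 =>
          have hrest : rest ≠ [] := by
            intro hr; subst hr; simp [pvSplit] at h
          rw [h] at ih
          simp only [List.modifyHead, List.getLastD_cons] at *
          rw [ih]
          cases rest with
          | nil => exact absurd rfl hrest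
          | cons r rs => rw [List.getLast?_cons_cons]

def pvTrailStrip (p : List Char) : List Char :=
  if p.getLast? = some ' ' then p.dropLast else p
def pvLeadStrip (p : List Char) : List Char :=
  if p.head? = some ' ' then p.tail else p

def pvAFold : List (List Char) → Bool → List Char
  | [], _ => []
  | [p], b => if b then pvLeadStrip p else pvTrailStrip p
  | p :: q :: ps, b =>
    (if b then pvLeadStrip p else pvTrailStrip p) ++ '$' :: pvAFold (q :: ps) (!b)

theorem procA_even (p : List Char) :
    (if PySem.Chars.endswith p [' '] then PySem.Chars.slice p none (some (-1)) else p)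
      = pvTrailStrip p := by
  rw [pvTrailStrip]
  by_cases h : p.getLast? = some ' '
  · rw [if_pos ((PySem.Chars.endswith_iff p [' ']).mpr ((sfx_one p ' ').mpr h)), if_pos h]
    simp [PySem.Chars.slice_eq_listSlice, PySem.List.slice_to_neg_one]
  · rw [if_neg h, if_neg (fun hb => h ((sfx_one p ' ').mp ((PySem.Chars.endswith_iff p [' ']).mp hb)))]

theorem procA_odd (p : List Char) :
    (if PySem.Chars.startswith p [' '] then PySem.Chars.slice p (some 1) none else p)
      = pvLeadStrip p := by
  rw [pvLeadStrip]
  by_cases h : p.head? = some ' '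
  · rw [if_pos ((PySem.Chars.startswith_iff p [' ']).mpr ((pfx_one p ' ').mpr h)), if_pos h]
    simp [PySem.Chars.slice_eq_listSlice, PySem.List.slice_from_one]
  · rw [if_neg h, if_neg (fun hb => h ((pfx_one p ' ').mp ((PySem.Chars.startswith_iff p [' ']).mp hb)))]

theorem pvALoop (parts : List (List Char)) :
    ∀ (suffix : List (List Char)) (s : Nat) (acc : List Char), parts.drop s = suffix →
    (PySem.List.pyRange (s : Int) (PySem.List.len parts) 1).foldl
      (pvABody parts) acc
      = acc ++ pvAFold suffix (decide (s % 2 = 1)) := by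
  intro suffix
  induction suffix with
  | nil =>
    intro s acc hdrop
    have hlen : parts.length ≤ s := by
      have := congrArg List.length hdrop; simp at this; omega
    rw [show PySem.List.len parts = (parts.length : Int) from by simp,
      PySem.List.pyRange_one_eq_nil (by exact_mod_cast hlen)]
    simp [pvAFold]
  | cons p rest' ih =>
    intro s acc hdrop
    have hlend := congrArg List.length hdrop
    simp only [List.length_drop, List.length_cons] at hlend
    have hlt : s < parts.length := by omega
    have hget : parts.getD s [] = p := by
      have h0 : (parts.drop s)[0]? = some p := by rw [hdrop]; rfl
      rw [List.getElem?_drop] at h0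
      simp only [Nat.add_zero] at h0
      simp [List.getD, h0]
    have hdrop1 : parts.drop (s + 1) = rest' := by
      have : parts.drop (s + 1) = (parts.drop s).drop 1 := by
        rw [List.drop_drop]
      rw [this, hdrop]; rfl
    rw [show PySem.List.len parts = (parts.length : Int) from by simp,
      PySem.List.pyRange_one_cons (by exact_mod_cast hlt), List.foldl_cons]
    have hmod : PySem.Int.mod (s : Int) 2 = ((s % 2 : Nat) : Int) := by
      rw [PySem.Int.mod_eq_emod_of_pos (by norm_num)]
      omega
    have hlast : ((s : Int) < (parts.length : Int) - 1) ↔ rest' ≠ [] := by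
      constructor
      · intro hh hnil; subst hnil; simp only [List.length_nil] at hlend; omega
      · intro hh
        have : 1 ≤ rest'.length := by
          cases rest' with | nil => exact absurd rfl hh | cons _ _ => simp
        omega
    have hs1 : ((s : Int) + 1) = ((s + 1 : Nat) : Int) := by push_cast; ring
    have hparflip : decide ((s + 1) % 2 = 1) = !decide (s % 2 = 1) := by
      by_cases hpar : s % 2 = 1 <;> simp [hpar] <;> omega
    have ih' : ∀ acc' : List Char,
        (PySem.List.pyRange ((s + 1 : Nat) : Int) ((parts.length : Int)) 1).foldl
          (pvABody parts) acc'
          = acc' ++ pvAFold rest' (decide ((s + 1) % 2 = 1)) := by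
      intro acc'
      have h := ih (s + 1) acc' hdrop1
      rw [show PySem.List.len parts = (parts.length : Int) from by simp] at h
      exact h
    rw [hs1, ih' _, hparflip]
    simp only [pvABody, PySem.List.len_eq, PySem.List.pyGetD_natCast, hget, hmod, procA_even, procA_odd]
    cases rest' with
    | nil =>
      rw [if_neg (fun hh => (hlast.mp hh) rfl)]
      by_cases hpar : s % 2 = 1
      · have : s % 2 = 1 := hpar
        simp [pvAFold, hpar]
      · have hpar0 : s % 2 = 0 := by omega
        simp [pvAFold, hpar0, hpar]
    | cons q ps =>
      rw [if_pos (hlast.mpr (by simp))]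
      show _ = acc ++ pvAFold (p :: q :: ps) (decide (s % 2 = 1))
      rw [pvAFold]
      by_cases hpar : s % 2 = 1
      · simp [hpar]
      · have hpar0 : s % 2 = 0 := by omega
        simp [hpar0, hpar]

theorem pvA_eq_aFold (sentence : String) :
    adjust_dollar_sign_spacing sentence =
      String.ofList (pvAFold (pvSplit sentence.toList) false) := by
  rw [adjust_dollar_sign_spacing]
  simp only [pvSplitOn_eq]
  rw [show (0 : Int) = ((0 : Nat) : Int) from rfl,
    pvALoop (pvSplit sentence.toList) (pvSplit sentence.toList) 0 [] (by simp)]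
  simp

def pvBFold : List (List Char) → Bool → List Char
  | [], _ => []
  | [p], _ => p
  | p :: q :: ps, b =>
    if b then p ++ '$' :: pvBFold (q :: ps) false
    else pvTrailStrip p ++ '$' :: pvBFold (pvLeadStrip q :: ps) true
termination_by parts _ => parts.length

theorem pvBLoop_scan (p : List Char) : ∀ (cs acc : List Char) (odd : Bool), '$' ∉ p →
    pvBLoop (p ++ cs) odd acc = pvBLoop cs odd (p.reverse ++ acc) := by
  induction p with
  | nil => intro cs acc odd _; simp
  | cons c t ih =>
    intro cs acc odd hnd
    have hc : ¬ c = '$' := fun h => hnd (h ▸ List.mem_cons_self)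
    rw [List.cons_append, pvBLoop]
    rw [if_neg hc, ih cs (c :: acc) odd (fun h => hnd (List.mem_cons_of_mem c h))]
    simp

theorem pvBLoop_cons_dollar_true (rest acc : List Char) :
    pvBLoop ('$' :: rest) true acc = pvBLoop rest false ('$' :: acc) := by
  rw [pvBLoop]; simp

theorem pvBLoop_cons_dollar_false (rest acc : List Char) :
    pvBLoop ('$' :: rest) false acc
      = pvBLoop (if rest.head? = some ' ' then rest.tail else rest) true
          ('$' :: (if acc.head? = some ' ' then acc.tail else acc)) := by
  rw [pvBLoop]
  cases rest with
  | nil => simp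
  | cons d r2 => by_cases hd : d = ' ' <;> simp [hd]

theorem pvBLoop_join : ∀ (n : Nat) (parts : List (List Char)) (b : Bool) (acc : List Char),
    parts.length ≤ n → (∀ p ∈ parts, '$' ∉ p) → acc.head? ≠ some ' ' →
    pvBLoop (pvJoinD parts) b acc = acc.reverse ++ pvBFold parts b := by
  intro n
  induction n with
  | zero =>
    intro parts b acc hn _ _
    have : parts = [] := List.length_eq_zero_iff.mp (Nat.le_zero.mp hn)
    subst this
    simp [pvJoinD, pvBLoop, pvBFold]
  | succ n ih =>
    intro parts b acc hn hnd hacc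
    match parts with
    | [] => simp [pvJoinD, pvBLoop, pvBFold]
    | [p] =>
      rw [show pvJoinD [p] = p from rfl, show pvBFold [p] b = p from by simp [pvBFold]]
      rw [← List.append_nil p, pvBLoop_scan p [] acc b (hnd p (by simp))]
      simp [pvBLoop]
    | p :: q :: ps =>
      rw [show pvJoinD (p :: q :: ps) = p ++ '$' :: pvJoinD (q :: ps) from rfl]
      rw [pvBLoop_scan p _ acc b (hnd p (by simp))]
      cases b with
      | true =>
        rw [pvBLoop_cons_dollar_true]
        rw [ih (q :: ps) false ('$' :: (p.reverse ++ acc)) (by simpa using hn)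
          (fun r hr => hnd r (List.mem_cons_of_mem p hr)) (by simp)]
        rw [show pvBFold (p :: q :: ps) true = p ++ '$' :: pvBFold (q :: ps) false from by
          rw [pvBFold]; simp]
        simp
      | false =>
        -- the pop of one trailing space of p
        have hpop : (if (p.reverse ++ acc).head? = some ' '
              then (p.reverse ++ acc).tail else (p.reverse ++ acc))
            = (pvTrailStrip p).reverse ++ acc := by
          rcases List.eq_nil_or_concat p with rfl | ⟨ys, y, hy⟩
          · simp only [List.reverse_nil, List.nil_append]
            rw [if_neg hacc, pvTrailStrip]
            simp
          · subst hy
            by_cases hy' : y = ' '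
            · subst hy'
              rw [if_pos (by simp), pvTrailStrip, if_pos (by simp)]
              simp
            · rw [if_neg (by simp [hy']), pvTrailStrip, if_neg (by simp [hy'])]
        -- the skip of one leading space of q
        have hskip : (if (pvJoinD (q :: ps)).head? = some ' '
              then (pvJoinD (q :: ps)).tail else pvJoinD (q :: ps))
            = pvJoinD (pvLeadStrip q :: ps) := by
          cases q with
          | nil =>
            rw [show pvLeadStrip [] = [] from rfl]
            cases ps with
            | nil => simp [pvJoinD]
            | cons r rs => rw [show pvJoinD ([] :: r :: rs) = '$' :: pvJoinD (r :: rs) from rfl]; simp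
          | cons d qt =>
            have hjq : ∀ xs : List Char, pvJoinD ((d :: xs) :: ps) = d :: pvJoinD (xs :: ps) := by
              intro xs; cases ps <;> simp [pvJoinD]
            by_cases hd : d = ' '
            · subst hd
              rw [hjq qt]
              simp [pvLeadStrip]
            · rw [hjq qt]
              have : pvLeadStrip (d :: qt) = d :: qt := by rw [pvLeadStrip]; simp [hd]
              rw [this, hjq qt]
              simp [hd]
        have hstep : pvBLoop ('$' :: pvJoinD (q :: ps)) false (p.reverse ++ acc)
            = pvBLoop (pvJoinD (pvLeadStrip q :: ps)) true ('$' :: ((pvTrailStrip p).reverse ++ acc)) := by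
          rw [pvBLoop_cons_dollar_false, hpop, hskip]
        rw [hstep]
        have hndq : '$' ∉ pvLeadStrip q := by
          rw [pvLeadStrip]
          have := hnd q (by simp)
          split
          · exact fun h => this (List.mem_of_mem_tail h)
          · exact this
        rw [ih (pvLeadStrip q :: ps) true _ (by simpa using hn)
          (by
            intro r hr
            rcases List.mem_cons.mp hr with rfl | hr
            · exact hndq
            · exact hnd r (List.mem_cons_of_mem p (List.mem_cons_of_mem q hr)))
          (by simp)]
        rw [show pvBFold (p :: q :: ps) false
            = pvTrailStrip p ++ '$' :: pvBFold (pvLeadStrip q :: ps) true from by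
          rw [pvBFold]; simp]
        simp

theorem pvB_eq_bFold (sentence : String) :
    adjust_dollar_sign_spacing_alt sentence =
      String.ofList (pvBFold (pvSplit sentence.toList) false) := by
  rw [adjust_dollar_sign_spacing_alt]
  rw [show pvBLoop sentence.toList false []
      = pvBLoop (pvJoinD (pvSplit sentence.toList)) false [] from by
    rw [pvJoinD_pvSplit]]
  rw [pvBLoop_join (pvSplit sentence.toList).length (pvSplit sentence.toList) false []
    le_rfl (pvSplit_no_dollar sentence.toList) (by simp)]
  simp

theorem pvAFold_eq_bFold : ∀ (parts : List (List Char)) (b : Bool),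
    ((if (parts.length - 1) % 2 = 1 then !b else b) = true ∨
      (parts.getLastD []).getLast? ≠ some ' ') →
    pvAFold parts b = pvBFold (if b then parts.modifyHead pvLeadStrip else parts) b := by
  intro parts
  induction parts with
  | nil => intro b h; cases b <;> simp [pvAFold, pvBFold]
  | cons p rest ih =>
    intro b h
    cases rest with
    | nil =>
      cases b with
      | true => simp [pvAFold, pvBFold, List.modifyHead]
      | false =>
        have hns : p.getLast? ≠ some ' ' := by
          rcases h with h | h
          · simp at h
          · simpa using h
        simp [pvAFold, pvBFold, pvTrailStrip, hns]
    | cons q ps =>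
      have hlast : ∃ x, (q :: ps).getLast? = some x := by
        cases hgl : (q :: ps).getLast? with
        | none => simp at hgl
        | some x => exact ⟨x, rfl⟩
      rcases hlast with ⟨x, hx⟩
      have hcond : (if ((q :: ps).length - 1) % 2 = 1 then !(!b) else !b) = true ∨
          ((q :: ps).getLastD []).getLast? ≠ some ' ' := by
        rcases h with h | h
        · left
          simp only [List.length_cons] at h ⊢
          rcases Nat.even_or_odd ps.length with he | ho
          · have h2 : ps.length % 2 = 0 := Nat.even_iff.mp he
            have h3 : (ps.length + 1 - 1) % 2 = 0 := by omega
            have h4 : (ps.length + 1 + 1 - 1) % 2 = 1 := by omega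
            rw [if_pos h4] at h
            rw [if_neg (by omega)]
            cases b <;> simpa using h
          · have h2 : ps.length % 2 = 1 := Nat.odd_iff.mp ho
            have h4 : (ps.length + 1 + 1 - 1) % 2 = 0 := by omega
            rw [if_neg (by omega)] at h
            rw [if_pos (by omega)]
            cases b <;> simpa using h
        · right
          rw [List.getLastD_eq_getLast?] at h ⊢
          rw [List.getLast?_cons_cons] at h
          exact h
      cases b with
      | false =>
        have hrec := ih true hcond
        rw [show pvAFold (p :: q :: ps) false
            = pvTrailStrip p ++ '$' :: pvAFold (q :: ps) true from by rw [pvAFold]; simp]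
        rw [if_neg (by simp)]
        rw [show pvBFold (p :: q :: ps) false
            = pvTrailStrip p ++ '$' :: pvBFold (pvLeadStrip q :: ps) true from by
          rw [pvBFold]; simp]
        rw [hrec]
        simp [List.modifyHead]
      | true =>
        have hrec := ih false (by
          rcases hcond with hc | hc
          · left; simpa using hc
          · right; exact hc)
        rw [show pvAFold (p :: q :: ps) true
            = pvLeadStrip p ++ '$' :: pvAFold (q :: ps) false from by rw [pvAFold]; simp]
        rw [if_pos rfl]
        rw [show (p :: q :: ps).modifyHead pvLeadStrip = pvLeadStrip p :: q :: ps from rfl]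
        rw [show pvBFold (pvLeadStrip p :: q :: ps) true
            = pvLeadStrip p ++ '$' :: pvBFold (q :: ps) false from by rw [pvBFold]; simp]
        rw [hrec]
        simp

theorem pv_main (sentence : String) (hnd : ¬ D_adjust_dollar_sign_spacing sentence) :
    adjust_dollar_sign_spacing sentence = adjust_dollar_sign_spacing_alt sentence := by
  simp only [D_adjust_dollar_sign_spacing, not_and] at hnd
  rw [pvA_eq_aFold, pvB_eq_bFold]
  congr 1
  have hcnt := pvSplit_length sentence.toList
  have hcond : ((if ((pvSplit sentence.toList).length - 1) % 2 = 1 then !false else false) = true ∨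
      ((pvSplit sentence.toList).getLastD []).getLast? ≠ some ' ') := by
    by_cases hc : sentence.toList.count '$' % 2 = 0
    · right
      intro hgl
      exact (fun h => h hc) (hnd ((pvSplit_getLast_sp sentence.toList).mp hgl))
    · left
      rw [if_pos (by omega)]
      rfl
  simpa using pvAFold_eq_bFold (pvSplit sentence.toList) false hcond

theorem pvAFold_len_bFold : ∀ (parts : List (List Char)) (b : Bool),
    (if (parts.length - 1) % 2 = 1 then !b else b) = false →
    (parts.getLastD []).getLast? = some ' ' →
    (pvAFold parts b).length + 1
      = (pvBFold (if b then parts.modifyHead pvLeadStrip else parts) b).length := by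
  intro parts
  induction parts with
  | nil => intro b h1 h2; simp at h2
  | cons p rest ih =>
    intro b h1 h2
    cases rest with
    | nil =>
      have hb : b = false := by
        rcases b with _ | _
        · rfl
        · simp at h1
      subst hb
      have hp : p.getLast? = some ' ' := by simpa using h2
      rcases List.eq_nil_or_concat p with rfl | ⟨ys, y, hy⟩
      · simp at hp
      · subst hy
        simp at hp
        subst hp
        simp [pvAFold, pvBFold, pvTrailStrip]
    | cons q ps =>
      have h2' : ((q :: ps).getLastD []).getLast? = some ' ' := by
        rw [List.getLastD_eq_getLast?] at h2 ⊢
        rw [List.getLast?_cons_cons] at h2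
        exact h2
      have h1' : (if ((q :: ps).length - 1) % 2 = 1 then !(!b) else !b) = false := by
        simp only [List.length_cons] at h1 ⊢
        rcases Nat.even_or_odd ps.length with he | ho
        · have h3 : ps.length % 2 = 0 := Nat.even_iff.mp he
          rw [if_pos (by omega)] at h1
          rw [if_neg (by omega)]
          cases b <;> simpa using h1
        · have h3 : ps.length % 2 = 1 := Nat.odd_iff.mp ho
          rw [if_neg (by omega)] at h1
          rw [if_pos (by omega)]
          cases b <;> simpa using h1
      cases b with
      | false =>
        have hrec := ih true h1' h2'
        rw [show pvAFold (p :: q :: ps) false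
            = pvTrailStrip p ++ '$' :: pvAFold (q :: ps) true from by rw [pvAFold]; simp]
        rw [if_neg (by simp)]
        rw [show pvBFold (p :: q :: ps) false
            = pvTrailStrip p ++ '$' :: pvBFold (pvLeadStrip q :: ps) true from by
          rw [pvBFold]; simp]
        rw [show pvBFold (pvLeadStrip q :: ps) true
            = pvBFold ((q :: ps).modifyHead pvLeadStrip) true from rfl]
        rw [if_pos rfl] at hrec
        simp only [List.length_append, List.length_cons]
        omega
      | true =>
        have hrec := ih false h1' h2'
        rw [show pvAFold (p :: q :: ps) true
            = pvLeadStrip p ++ '$' :: pvAFold (q :: ps) false from by rw [pvAFold]; simp]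
        rw [if_pos rfl]
        rw [show (p :: q :: ps).modifyHead pvLeadStrip = pvLeadStrip p :: q :: ps from rfl]
        rw [show pvBFold (pvLeadStrip p :: q :: ps) true
            = pvLeadStrip p ++ '$' :: pvBFold (q :: ps) false from by rw [pvBFold]; simp]
        rw [if_neg (by simp)] at hrec
        simp only [List.length_append, List.length_cons]
        omega

-- ===== VERDICT (by name: the statement is the Claim_ definition above) =====
theorem adjust_dollar_sign_spacing_spec : Claim_unchanged_adjust_dollar_sign_spacing := by
  intro sentence _ hnd
  exact pv_main sentence hnd

theorem adjust_dollar_sign_spacing_changed : Claim_changed_adjust_dollar_sign_spacing := by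
  unfold Claim_changed_adjust_dollar_sign_spacing; decide

theorem adjust_dollar_sign_spacing_tight : Claim_exact_adjust_dollar_sign_spacing := by
  intro sentence _ hD heq
  rcases hD with ⟨hgl, hc⟩
  have hcnt := pvSplit_length sentence.toList
  have h1 : (if ((pvSplit sentence.toList).length - 1) % 2 = 1 then !false else false) = false := by
    rw [if_neg (by omega)]
  have h2 : ((pvSplit sentence.toList).getLastD []).getLast? = some ' ' :=
    (pvSplit_getLast_sp sentence.toList).mpr hgl
  have hlen := pvAFold_len_bFold (pvSplit sentence.toList) false h1 h2
  rw [if_neg (by simp)] at hlen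
  rw [pvA_eq_aFold, pvB_eq_bFold] at heq
  have := congrArg (fun t => t.toList.length) heq
  simp only [String.toList_ofList] at this
  omega
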